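-- pv_equiv track=rewrite | github.com/FlorianPfaff/PyRecEst | src/pyrecest/utils/track_evaluation.py | _identity_switches
-- ===== SOURCE A (Python) =====
-- from typing import Any, TypeAlias
--
-- Observation: TypeAlias = tuple[int, int]
--
-- def _identity_switches(
--     observations: list[Observation], lookup: dict[Observation, int]
-- ) -> int:
--     last_id: int | None = None
--     switches = 0
--     for observation in sorted(observations):
--         track_id = lookup.get(observation)
--         if track_id is None:
--             continue
--         if last_id is not None and track_id != last_id:
--             switches += 1
--         last_id = track_id
--     return switches
-- ===== SOURCE B (Python) =====
-- def _identity_switches(observations, lookup):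
--     # Valid track ids in sorted observation order.
--     ids = [lookup[o] for o in sorted(observations) if o in lookup]
--
--     # Count the maximal runs of equal consecutive ids by recursion:
--     # peel off one whole run at a time.
--     def runs(seq):
--         if not seq:
--             return 0
--         head = seq[0]
--         i = 1
--         while i < len(seq) and seq[i] == head:
--             i += 1
--         return 1 + runs(seq[i:])
--
--     r = runs(ids)
--     # A switch happens exactly between two consecutive runs.
--     return r - 1 if r else 0
-- ===== Notes on version B (the rewrite author's own statement) =====
-- stated objective: alternative
-- what changed: B characterises the answer as (number of maximal runs of equal consecutive track ids) - 1 and computes the run count by recursion that peels off one whole run per call, instead of A's single last_id/switches accumulator loop comparing each element with its predecessor.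
import Mathlib
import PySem

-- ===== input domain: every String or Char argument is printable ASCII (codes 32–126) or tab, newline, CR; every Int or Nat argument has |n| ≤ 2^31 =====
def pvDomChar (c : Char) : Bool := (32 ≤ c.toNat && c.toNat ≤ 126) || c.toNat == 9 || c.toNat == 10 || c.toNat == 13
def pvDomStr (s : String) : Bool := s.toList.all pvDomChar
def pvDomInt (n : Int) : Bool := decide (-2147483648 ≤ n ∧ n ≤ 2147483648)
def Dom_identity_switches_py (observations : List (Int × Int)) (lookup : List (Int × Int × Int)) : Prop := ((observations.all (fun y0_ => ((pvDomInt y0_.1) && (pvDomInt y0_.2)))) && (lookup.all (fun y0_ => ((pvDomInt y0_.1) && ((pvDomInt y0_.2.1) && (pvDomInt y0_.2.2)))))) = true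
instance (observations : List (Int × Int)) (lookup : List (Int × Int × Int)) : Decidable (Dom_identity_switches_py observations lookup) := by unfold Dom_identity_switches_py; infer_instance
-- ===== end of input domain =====

-- B counts the maximal runs of equal consecutive valid track ids (peeling one
-- whole run per recursive call) and returns runs-1, instead of A's last_id /
-- switches accumulator loop; alternative decomposition, same cost.

-- dict access on the assoc list: first entry whose key matches, its value
def pyDictGet (lookup : List (Int × Int × Int)) (o : Int × Int) : Option Int :=
  (lookup.find? (fun e => e.1 == o.1 && e.2.1 == o.2)).map (fun e => e.2.2)

-- ===== PORT A =====
-- the for-loop over sorted(observations) with state (last_id, switches)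
def aLoop (lookup : List (Int × Int × Int)) :
    List (Int × Int) → Option Int → Int → Int
  | [], _, switches => switches
  | o :: rest, last_id, switches =>
    match pyDictGet lookup o with
    | none => aLoop lookup rest last_id switches                  -- continue
    | some track_id =>
      let switches :=
        match last_id with                                        -- last_id is not None and track_id != last_id
        | some l => if track_id ≠ l then switches + 1 else switches
        | none => switches
      aLoop lookup rest (some track_id) switches

def identity_switches_py (observations : List (Int × Int)) (lookup : List (Int × Int × Int)) : Int :=
  aLoop lookup (PySem.List.sorted2 observations (fun p => p.1) (fun p => p.2)) none 0

-- ===== PORT B =====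
-- runs(seq): peel off the maximal leading run of elements equal to seq[0]
-- (the Python while loop computes exactly seq[i:] = the tail with that run
-- dropped) and recurse; exact transcription of Source B's helper.
def runCount : List Int → Int
  | [] => 0
  | h :: t => 1 + runCount (t.dropWhile (fun x => x == h))
termination_by l => l.length
decreasing_by
  have := List.length_dropWhile_le (fun x => x == h) t
  simp only [List.length_cons]
  omega

def identity_switches_py_alt (observations : List (Int × Int)) (lookup : List (Int × Int × Int)) : Int :=
  let ids := (PySem.List.sorted2 observations (fun p => p.1) (fun p => p.2)).filterMap (pyDictGet lookup)
  let r := runCount ids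
  if r ≠ 0 then r - 1 else 0

-- ===== PRECONDITION & SPEC =====
def Spec_identity_switches_py (observations : List (Int × Int)) (lookup : List (Int × Int × Int)) (out : Int) : Prop := out = identity_switches_py_alt observations lookup
instance (observations : List (Int × Int)) (lookup : List (Int × Int × Int)) (out : Int) : Decidable (Spec_identity_switches_py observations lookup out) := by unfold Spec_identity_switches_py; infer_instance

-- ===== CLAIM (what is proved, stated in full; the proofs are below) =====
def Claim_equal_identity_switches_py : Prop := ∀ (observations : List (Int × Int)) (lookup : List (Int × Int × Int)), Dom_identity_switches_py observations lookup → Spec_identity_switches_py observations lookup (identity_switches_py observations lookup)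

-- ===== LEMMAS AND PROOFS =====

-- number of switches in a plain id list, given the previous id
def cnt : Option Int → List Int → Int
  | _, [] => 0
  | none, t :: ts => cnt (some t) ts
  | some l, t :: ts => (if t ≠ l then 1 else 0) + cnt (some t) ts

theorem aLoop_eq_cnt (lookup : List (Int × Int × Int)) :
    ∀ (L : List (Int × Int)) (last : Option Int) (sw : Int),
      aLoop lookup L last sw = sw + cnt last (L.filterMap (pyDictGet lookup)) := by
  intro L
  induction L with
  | nil => intro last sw; simp [aLoop, cnt]
  | cons o rest ih =>
    intro last sw
    cases hg : pyDictGet lookup o with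
    | none => simp [aLoop, hg, ih]
    | some t =>
      cases last with
      | none => simp [aLoop, hg, ih, cnt]
      | some l =>
        by_cases h : t = l
        · simp [aLoop, hg, ih, cnt, h]
        · simp [aLoop, hg, ih, cnt, h]
          ring

theorem runCount_nil : runCount [] = 0 := by rw [runCount.eq_def]

theorem runCount_cons (h : Int) (t : List Int) :
    runCount (h :: t) = 1 + runCount (t.dropWhile (fun x => x == h)) := by
  rw [runCount.eq_def]

theorem cnt_some_eq_runCount :
    ∀ (ids : List Int) (l : Int),
      cnt (some l) ids = runCount (ids.dropWhile (fun x => x == l)) := by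
  intro ids
  induction ids with
  | nil => intro l; simp [cnt, runCount_nil]
  | cons t ts ih =>
    intro l
    by_cases h : t = l
    · simp [cnt, h, List.dropWhile, ih]
    · have hb : (t == l) = false := by simp [h]
      simp only [cnt, List.dropWhile, hb, ih t, runCount_cons]
      simp [h]

theorem runCount_nonneg_aux : ∀ (n : Nat) (ids : List Int), ids.length ≤ n → 0 ≤ runCount ids := by
  intro n
  induction n with
  | zero =>
    intro ids hle
    cases ids with
    | nil => simp [runCount_nil]
    | cons h t => simp at hle
  | succ n ih =>
    intro ids hle
    cases ids with
    | nil => simp [runCount_nil]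
    | cons h t =>
      rw [runCount_cons]
      have hd := List.length_dropWhile_le (fun x => x == h) t
      have := ih (t.dropWhile (fun x => x == h)) (by simp at hle; omega)
      omega

theorem runCount_nonneg (ids : List Int) : 0 ≤ runCount ids :=
  runCount_nonneg_aux ids.length ids le_rfl

theorem cnt_none_eq (ids : List Int) :
    cnt none ids = (if runCount ids ≠ 0 then runCount ids - 1 else 0) := by
  cases ids with
  | nil => simp [cnt, runCount_nil]
  | cons h t =>
    have h1 : cnt none (h :: t) = runCount (t.dropWhile (fun x => x == h)) := by
      simpa using cnt_some_eq_runCount t h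
    have h2 := runCount_cons h t
    have h3 := runCount_nonneg (t.dropWhile (fun x => x == h))
    rw [h1, h2]
    split_ifs with hx
    · omega
    · omega

-- ===== VERDICT (by name: the statement is the Claim_ definition above) =====
theorem identity_switches_py_spec : Claim_equal_identity_switches_py := by
  intro observations lookup _
  unfold Spec_identity_switches_py identity_switches_py identity_switches_py_alt
  rw [aLoop_eq_cnt, cnt_none_eq]
  simp
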